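-- pv_equiv track=rewrite | github.com/bast/advent-of-code | 2016/day-24/air-duct.py | possible_sequences
-- ===== SOURCE A (Python) =====
-- from itertools import permutations, combinations
--
-- def possible_sequences(highest_waypoint, back_to_start):
--     sequences = []
--     for p in permutations(range(1, highest_waypoint + 1)):
--         l = [0] + list(p)
--         if back_to_start:
--             l += [0]
--         sequences.append(tuple(l))
--     return sequences
-- ===== SOURCE B (Python) =====
-- def possible_sequences(highest_waypoint, back_to_start):
--     suffix = (0,) if back_to_start else ()
--     stack = [((0,), tuple(range(1, highest_waypoint + 1)))]
--     out = []
--     while stack: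
--         path, remaining = stack.pop()
--         if not remaining:
--             out.append(path + suffix)
--             continue
--         for i in range(len(remaining) - 1, -1, -1):
--             stack.append((path + (remaining[i],), remaining[:i] + remaining[i + 1:]))
--     return out
-- ===== Notes on version B (the rewrite author's own statement) =====
-- stated objective: alternative
-- what changed: Replaced itertools.permutations plus per-permutation list concatenation with an explicit-stack depth-first backtracking loop that picks each remaining waypoint in increasing order and emits the complete tuple (0 prefix and optional 0 suffix already attached) when no waypoint remains.
import Mathlib
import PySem

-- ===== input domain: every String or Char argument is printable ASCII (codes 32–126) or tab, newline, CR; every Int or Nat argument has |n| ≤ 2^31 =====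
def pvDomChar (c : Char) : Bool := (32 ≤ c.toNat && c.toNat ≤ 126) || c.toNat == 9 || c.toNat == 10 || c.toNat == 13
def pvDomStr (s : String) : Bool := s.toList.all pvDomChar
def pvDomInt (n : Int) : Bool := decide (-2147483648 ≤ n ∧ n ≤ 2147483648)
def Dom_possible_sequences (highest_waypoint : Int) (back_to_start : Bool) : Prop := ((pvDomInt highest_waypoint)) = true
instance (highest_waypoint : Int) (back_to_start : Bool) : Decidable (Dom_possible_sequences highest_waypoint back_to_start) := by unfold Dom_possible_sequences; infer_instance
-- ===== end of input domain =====

-- B replaces itertools.permutations + per-permutation list building with an explicit-stack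
-- depth-first backtracking loop (same output, same order); objective: alternative algorithm.
-- ===== PORT A =====
def pvSel (xs : List Int) : List (Int × List Int) :=
  match xs with
  | [] => []
  | x :: rest => (x, rest) :: (pvSel rest).map (fun p => (p.1, x :: p.2))

theorem pvSel_length {xs : List Int} {p : Int × List Int} (hp : p ∈ pvSel xs) :
    p.2.length + 1 = xs.length := by
  induction xs generalizing p with
  | nil => simp [pvSel] at hp
  | cons x rest ih =>
    simp only [pvSel, List.mem_cons, List.mem_map] at hp
    rcases hp with h | ⟨q, hq, rfl⟩
    · subst h; simp
    · have := ih hq; simp [List.length_cons]; omega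

-- itertools.permutations of a distinct list, in itertools' order
def pvPerms : List Int → List (List Int)
  | [] => [[]]
  | x :: rest =>
    (pvSel (x :: rest)).attach.flatMap (fun ⟨p, _hp⟩ => (pvPerms p.2).map (fun q => p.1 :: q))
termination_by xs => xs.length
decreasing_by have := pvSel_length _hp; simp only [List.length_cons] at this ⊢; omega

def possible_sequences (highest_waypoint : Int) (back_to_start : Bool) : List (List Int) :=
  (pvPerms (PySem.List.pyRange 1 (highest_waypoint + 1) 1)).foldl
    (fun sequences p =>
      let l := [(0 : Int)] ++ p
      let l := if back_to_start then l ++ [0] else l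
      sequences ++ [l]) []


-- ===== PORT B =====
-- weight of a stack frame: an upper bound on the pops its DFS subtree generates (termination measure)
def pvW : Nat → Nat
  | 0 => 1
  | k + 1 => 1 + (k + 1) * pvW k

theorem pvW_push (x : Int) (r : List Int) (path : List Int)
    (rest : List (List Int × List Int)) :
    ((((List.range (x :: r).length).map
        (fun i => (path ++ [(x :: r).getD i 0], (x :: r).eraseIdx i))) ++ rest).map
      (fun s => pvW s.2.length)).sum
      < (((path, x :: r) :: rest).map (fun s => pvW s.2.length)).sum := by
  rw [List.map_append, List.sum_append, List.map_map]
  have hconst : ((List.range (x :: r).length).map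
      ((fun s : List Int × List Int => pvW s.2.length) ∘
        (fun i => (path ++ [(x :: r).getD i 0], (x :: r).eraseIdx i))))
      = (List.range (x :: r).length).map (fun _ => pvW r.length) := by
    refine List.map_congr_left (fun i hi => ?_)
    have hi' : i < (x :: r).length := List.mem_range.mp hi
    have hi2 : i ≤ r.length := by simpa using Nat.lt_succ_iff.mp (by simpa using hi')
    simp [Function.comp, List.length_eraseIdx, hi2]
  rw [hconst, List.map_const', List.sum_replicate, smul_eq_mul]
  simp only [List.map_cons, List.sum_cons, List.length_cons, pvW, List.length_range]
  omega

-- explicit-stack DFS loop of Source B (head of the list = top of the Python stack)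
def pvLoop : List (List Int × List Int) → List (List Int) → List Int → List (List Int)
  | [], out, _ => out
  | (path, []) :: rest, out, suffix => pvLoop rest (out ++ [path ++ suffix]) suffix
  | (path, x :: r) :: rest, out, suffix =>
      pvLoop ((List.range (x :: r).length).map
        (fun i => (path ++ [(x :: r).getD i 0], (x :: r).eraseIdx i)) ++ rest) out suffix
termination_by stack _ _ => (stack.map (fun s => pvW s.2.length)).sum
decreasing_by
  · simp [pvW]
  · exact pvW_push x r path rest

def possible_sequences_alt (highest_waypoint : Int) (back_to_start : Bool) : List (List Int) :=
  pvLoop [([0], PySem.List.pyRange 1 (highest_waypoint + 1) 1)] []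
    (if back_to_start then [0] else [])


-- ===== PRECONDITION & SPEC =====
def Spec_possible_sequences (highest_waypoint : Int) (back_to_start : Bool) (out : List (List Int)) : Prop := out = possible_sequences_alt highest_waypoint back_to_start
instance (highest_waypoint : Int) (back_to_start : Bool) (out : List (List Int)) : Decidable (Spec_possible_sequences highest_waypoint back_to_start out) := by unfold Spec_possible_sequences; infer_instance

-- ===== CLAIM (what is proved, stated in full; the proofs are below) =====
def Claim_equal_possible_sequences : Prop := ∀ (highest_waypoint : Int) (back_to_start : Bool), Dom_possible_sequences highest_waypoint back_to_start → Spec_possible_sequences highest_waypoint back_to_start (possible_sequences highest_waypoint back_to_start)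

-- ===== LEMMAS AND PROOFS =====

-- proof-side helper: the DFS emission as a recursive function on one frame
def pvBT : List Int → List Int → List Int → List (List Int)
  | [], path, suffix => [path ++ suffix]
  | x :: rest, path, suffix =>
    (List.range (x :: rest).length).attach.flatMap (fun ⟨i, _hi⟩ =>
      pvBT ((x :: rest).eraseIdx i) (path ++ [(x :: rest).getD i 0]) suffix)
termination_by rem _ _ => rem.length
decreasing_by
  have hi' : i < (x :: rest).length := by simpa using _hi
  simp only [List.length_eraseIdx, hi', if_pos]
  omega

theorem pvSel_eq (xs : List Int) :
    pvSel xs = (List.range xs.length).map (fun i => (xs.getD i 0, xs.eraseIdx i)) := by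
  induction xs with
  | nil => simp [pvSel]
  | cons x rest ih =>
    simp only [pvSel, ih, List.length_cons, List.range_succ_eq_map, List.map_cons,
      List.map_map]
    simp [Function.comp, List.eraseIdx_cons_succ]

theorem pvBT_eq (n : Nat) : ∀ (rem : List Int), rem.length = n → ∀ (path suffix : List Int),
    pvBT rem path suffix = (pvPerms rem).map (fun p => path ++ p ++ suffix) := by
  induction n using Nat.strong_induction_on with
  | _ n ih =>
    intro rem hn path suffix
    match rem with
    | [] => simp [pvBT.eq_1, pvPerms.eq_1]
    | x :: rest =>
      rw [pvBT.eq_2, pvPerms.eq_2, List.map_flatMap]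
      rw [List.flatMap_subtype
        (g := fun i => pvBT ((x :: rest).eraseIdx i) (path ++ [(x :: rest).getD i 0]) suffix)
        (fun _ _ => rfl), List.unattach_attach]
      rw [List.flatMap_subtype
        (g := fun p => (pvPerms p.2).map (fun q => path ++ (p.1 :: q) ++ suffix))
        (fun _ _ => by simp [List.map_map, Function.comp]), List.unattach_attach]
      rw [pvSel_eq, List.flatMap_map]
      refine List.flatMap_congr (fun i hi => ?_)
      have hi' : i < (x :: rest).length := List.mem_range.mp hi
      have hi2 : i ≤ rest.length := by simpa using Nat.lt_succ_iff.mp (by simpa using hi')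
      have hlen : ((x :: rest).eraseIdx i).length = rest.length := by
        simp [List.length_eraseIdx]
        omega
      have hm : rest.length < n := by simp at hn; omega
      rw [ih rest.length hm _ hlen]
      simp [List.append_assoc]



theorem pvBT_cons (x : Int) (r : List Int) (path suffix : List Int) :
    pvBT (x :: r) path suffix
      = (List.range (x :: r).length).flatMap
          (fun i => pvBT ((x :: r).eraseIdx i) (path ++ [(x :: r).getD i 0]) suffix) := by
  rw [pvBT.eq_2]
  rw [List.flatMap_subtype
    (g := fun i => pvBT ((x :: r).eraseIdx i) (path ++ [(x :: r).getD i 0]) suffix)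
    (fun _ _ => rfl), List.unattach_attach]

theorem pvLoop_eq : ∀ (stack : List (List Int × List Int)) (out : List (List Int))
    (suffix : List Int),
    pvLoop stack out suffix = out ++ stack.flatMap (fun s => pvBT s.2 s.1 suffix) := by
  intro stack out suffix
  induction stack, out, suffix using pvLoop.induct with
  | case1 out suffix => simp [pvLoop]
  | case2 path rest out suffix ih =>
    rw [pvLoop.eq_2, ih]
    simp [pvBT.eq_1]
  | case3 path x r rest out suffix ih =>
    rw [pvLoop.eq_3, ih, List.flatMap_append, List.flatMap_map]
    simp only [List.flatMap_cons]
    rw [pvBT_cons]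


theorem pvFoldl_append_map (f : List Int → List Int) :
    ∀ (l : List (List Int)) (acc : List (List Int)),
      l.foldl (fun seqs p => seqs ++ [f p]) acc = acc ++ l.map f := by
  intro l
  induction l with
  | nil => simp
  | cons p rest ih => intro acc; simp [List.foldl_cons, ih]

-- ===== VERDICT (by name: the statement is the Claim_ definition above) =====
theorem possible_sequences_spec : Claim_equal_possible_sequences := by
  intro h b _
  unfold Spec_possible_sequences possible_sequences possible_sequences_alt
  rw [pvLoop_eq, pvFoldl_append_map]
  simp only [List.flatMap_cons, List.flatMap_nil, List.append_nil, List.nil_append]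
  rw [pvBT_eq (PySem.List.pyRange 1 (h + 1) 1).length _ rfl]
  cases b <;> simp
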